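-- pv_equiv track=rewrite | github.com/BioHack2018/Z-8 | step5.py | trojki
-- ===== SOURCE A (Python) =====
-- kodon_start = "AUG"
--
-- kodon_stop1 = "UAG"
--
-- kodon_stop2 = "UAA"
--
-- kodon_stop3 = "UGA"
--
-- sequence="xxxxxxAUGxxxxxxxxxxUAGxxxxxxxxUAAxxxxxxUGAxxxxxxxAUGxxxUGAxxxxxxxxxxxxxUAGxxxxxxxxxxAUGxxxxxxUAAxxxxxxxxxxxxUAGxxxxxxxxxxxxxxxxxxAUGxxxxxxxxxxxxxxxUGAxxxx"
--
-- def trojki(list):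
--     list_of_genes=[]
--     for j in list:
--         starting_position=j
--         gene_start = sequence.find(kodon_start, starting_position)
--         temp_start = gene_start+3
--         while (True):
--             codon = sequence[temp_start: temp_start+3]
--             if codon == kodon_stop1 or codon == kodon_stop2 or codon == kodon_stop3:
--                 list_of_genes.append(sequence[gene_start:temp_start+3])
--                 break
--             else:
--                 temp_start += 3
--     print (list_of_genes)
--     return (list_of_genes)
-- ===== SOURCE B (Python) =====
-- kodon_start = "AUG"
--
-- kodon_stop1 = "UAG"
--
-- kodon_stop2 = "UAA"
--
-- kodon_stop3 = "UGA"
--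
-- sequence="xxxxxxAUGxxxxxxxxxxUAGxxxxxxxxUAAxxxxxxUGAxxxxxxxAUGxxxUGAxxxxxxxxxxxxxUAGxxxxxxxxxxAUGxxxxxxUAAxxxxxxxxxxxxUAGxxxxxxxxxxxxxxxxxxAUGxxxxxxxxxxxxxxxUGAxxxx"
--
--
-- def _tables():
--     # one backward scan: next AUG at-or-after i, and next in-frame stop at-or-after i
--     n = len(sequence)
--     na = [-1]              # next_aug[n], then n-1 ... 0, appended reversed
--     ns = [-1, -1, -1]      # next_stop[n+2], n+1, n, then n-1 ... 0
--     for i in range(n - 1, -1, -1):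
--         c = sequence[i:i+3]
--         na.append(i if c == kodon_start else na[-1])
--         ns.append(i if c in (kodon_stop1, kodon_stop2, kodon_stop3) else ns[-3])
--     next_aug = na[::-1]    # next_aug[i] for i = 0..n
--     next_stop = ns[::-1]   # next_stop[i] for i = 0..n+2
--     gene = {}
--     for p in range(n):
--         if sequence[p:p+3] == kodon_start:
--             t = next_stop[p + 3]
--             gene[p] = sequence[p:t+3] if t >= 0 else ""
--     return next_aug, gene
--
--
-- _NEXT_AUG, _GENE = _tables()
--
--
-- def trojki(list):
--     n = len(sequence)
--     out = []
--     for j in list: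
--         s = j + n if j < 0 else j       # str.find clamps its start like a slice bound
--         if s < 0:
--             s = 0
--         p = _NEXT_AUG[s] if s <= n else -1
--         out.append(_GENE.get(p, ""))
--     return out
-- ===== Notes on version B (the rewrite author's own statement) =====
-- stated objective: faster
-- what changed: A re-scans the fixed sequence for every query (str.find plus a codon-stepping while loop); B precomputes, in one backward scan done once at module load, a next-AUG-at-or-after table and the gene string for each AUG, then answers each query with two O(1) table lookups.
import Mathlib
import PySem

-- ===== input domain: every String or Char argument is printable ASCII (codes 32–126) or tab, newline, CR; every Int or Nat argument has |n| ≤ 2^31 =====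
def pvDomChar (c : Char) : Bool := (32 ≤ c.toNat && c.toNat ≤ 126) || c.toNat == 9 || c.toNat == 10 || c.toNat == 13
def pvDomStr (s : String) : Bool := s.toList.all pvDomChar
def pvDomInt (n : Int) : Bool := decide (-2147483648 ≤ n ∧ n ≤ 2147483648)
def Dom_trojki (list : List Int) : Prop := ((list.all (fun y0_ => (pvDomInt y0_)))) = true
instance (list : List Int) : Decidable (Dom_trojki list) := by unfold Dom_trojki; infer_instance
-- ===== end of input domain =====

-- B replaces A's per-query scan of the fixed sequence (find + codon-stepping while loop)
-- by tables precomputed once (next AUG per position, gene string per AUG), O(1) per query.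
-- A's print side effect is dropped; the equivalence is about the return value.

-- ===== PORT A =====
def kodonStart : String := "AUG"
def kodonStop1 : String := "UAG"
def kodonStop2 : String := "UAA"
def kodonStop3 : String := "UGA"
def pvSequence : String := "xxxxxxAUGxxxxxxxxxxUAGxxxxxxxxUAAxxxxxxUGAxxxxxxxAUGxxxUGAxxxxxxxxxxxxxUAGxxxxxxxxxxAUGxxxxxxUAAxxxxxxxxxxxxUAGxxxxxxxxxxxxxxxxxxAUGxxxxxxxxxxxxxxxUGAxxxx"

-- A's 'while True' loop; fuel-bounded recursion. On the fixed sequence every reachable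
-- start hits a stop codon well inside 64 steps (the equivalence proof depends on that),
-- so the fuel-exhaustion branch is never taken.
def trojkiWhile (geneStart : Int) : Nat → Int → String
  | 0, _ => ""
  | fuel+1, tempStart =>
      let codon := PySem.Str.slice pvSequence (some tempStart) (some (tempStart+3))
      if codon = kodonStop1 ∨ codon = kodonStop2 ∨ codon = kodonStop3 then
        PySem.Str.slice pvSequence (some geneStart) (some (tempStart+3))
      else trojkiWhile geneStart fuel (tempStart+3)

def trojki (list : List Int) : List String :=
  list.foldl (fun listOfGenes j =>
    let startingPosition := j
    let geneStart := PySem.Str.findFrom pvSequence kodonStart startingPosition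
    let tempStart := geneStart + 3
    listOfGenes ++ [trojkiWhile geneStart 64 tempStart]) []

-- ===== PORT B =====
-- one backward scan (Source B's na/ns lists, built head-first: python appends then reverses)
def altScan : List Int × List Int :=
  (PySem.List.pyRange 153 (-1) (-1)).foldl
    (fun (p : List Int × List Int) i =>
      let c := PySem.Str.slice pvSequence (some i) (some (i+3))
      ((if c = kodonStart then i else p.1.getD 0 (-1)) :: p.1,
       (if c = kodonStop1 ∨ c = kodonStop2 ∨ c = kodonStop3 then i else p.2.getD 2 (-1)) :: p.2))
    ([-1], [-1, -1, -1])

def altNextAug : List Int := altScan.1   -- next AUG at-or-after i, i = 0..154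
def altNextStop : List Int := altScan.2  -- next in-frame stop at-or-after i, i = 0..156

def altGene : PySem.Dict Int String :=   -- gene string per AUG position
  (PySem.List.pyRange 0 154 1).foldl (fun d p =>
    if PySem.Str.slice pvSequence (some p) (some (p+3)) = kodonStart then
      let t := PySem.List.pyGetD altNextStop (p+3) (-1)  -- index p+3 always in range
      d.insert p (if 0 ≤ t then PySem.Str.slice pvSequence (some p) (some (t+3)) else "")
    else d) PySem.Dict.empty

def trojki_alt (list : List Int) : List String :=
  let n : Int := PySem.Str.len pvSequence
  list.foldl (fun out j =>
    let s := if j < 0 then j + n else j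
    let s' := if s < 0 then 0 else s
    let p := if s' ≤ n then PySem.List.pyGetD altNextAug s' (-1) else -1  -- index in range: 0 ≤ s' ≤ n
    out ++ [altGene.getD p ""]) []

-- ===== PRECONDITION & SPEC =====
def Spec_trojki (list : List Int) (out : List String) : Prop := out = trojki_alt list
instance (list : List Int) (out : List String) : Decidable (Spec_trojki list out) := by unfold Spec_trojki; infer_instance

-- ===== CLAIM (what is proved, stated in full; the proofs are below) =====
def Claim_equal_trojki : Prop := ∀ (list : List Int), Dom_trojki list → Spec_trojki list (trojki list)

-- ===== LEMMAS AND PROOFS =====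

-- the clamped query position both programs reduce a query j to (str.find's slice-bound rule)
def clampQ (j : Int) : Nat :=
  if j < 0 then (if j + 154 < 0 then 0 else (j + 154).toNat) else (if 154 < j then 155 else j.toNat)

set_option maxRecDepth 4000 in
lemma findFrom_clamp (j : Int) :
    PySem.Str.findFrom pvSequence kodonStart j = PySem.Str.findFrom pvSequence kodonStart (clampQ j) := by
  have hL : pvSequence.toList.length = 154 := by decide
  simp only [PySem.Str.findFrom_eq, PySem.Chars.findFrom, hL]
  unfold clampQ
  by_cases h1 : j < 0
  · by_cases h2 : j + 154 < 0
    · simp [h1, h2]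
    · simp only [if_pos h1, if_neg h2]
      rw [Int.toNat_of_nonneg (by omega : (0:Int) <= j + 154)]
      simp [h2]
  · by_cases h3 : (154:Int) < j
    · simp [h1, h3]
    · have hm : max j 0 = j := by omega
      simp [h1, h3, hm]

set_option maxRecDepth 4000 in
lemma elemB_clamp (j : Int) :
    (let n : Int := PySem.Str.len pvSequence
     let s := if j < 0 then j + n else j
     let s' := if s < 0 then 0 else s
     let p := if s' <= n then PySem.List.pyGetD altNextAug s' (-1) else -1
     altGene.getD p "")
    = (let n : Int := PySem.Str.len pvSequence
       let s' : Int := clampQ j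
       let p := if s' <= n then PySem.List.pyGetD altNextAug s' (-1) else -1
       altGene.getD p "") := by
  have hn : PySem.Str.len pvSequence = 154 := by decide
  simp only [hn]
  unfold clampQ
  split_ifs <;> (try rfl) <;> (try (exfalso; omega)) <;> congr 2 <;> omega

lemma clampQ_lt (j : Int) : clampQ j < 156 := by
  unfold clampQ; split_ifs <;> omega

set_option maxHeartbeats 4000000 in
set_option maxRecDepth 10000 in
lemma key : ∀ c ∈ List.range 156,
    trojkiWhile (PySem.Str.findFrom pvSequence kodonStart (c : Int)) 64
      (PySem.Str.findFrom pvSequence kodonStart (c : Int) + 3)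
    = (let n : Int := PySem.Str.len pvSequence
       let s' : Int := (c : Int)
       let p := if s' ≤ n then PySem.List.pyGetD altNextAug s' (-1) else -1
       altGene.getD p "") := by
  decide

lemma elem_eq (j : Int) :
    trojkiWhile (PySem.Str.findFrom pvSequence kodonStart j) 64
      (PySem.Str.findFrom pvSequence kodonStart j + 3)
    = (let n : Int := PySem.Str.len pvSequence
       let s := if j < 0 then j + n else j
       let s' := if s < 0 then 0 else s
       let p := if s' ≤ n then PySem.List.pyGetD altNextAug s' (-1) else -1
       altGene.getD p "") := by
  rw [findFrom_clamp, elemB_clamp]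
  exact key (clampQ j) (List.mem_range.mpr (clampQ_lt j))

-- ===== VERDICT (by name: the statement is the Claim_ definition above) =====
theorem trojki_spec : Claim_equal_trojki := by
  intro list _
  show trojki list = trojki_alt list
  unfold trojki trojki_alt
  rw [PySem.List.foldl_append_singleton_eq_map, PySem.List.foldl_append_singleton_eq_map]
  exact List.map_congr_left (fun j _ => elem_eq j)
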